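-- pv_equiv track=rewrite | github.com/yashrocky888/GuruSuite | apps/guru-api/src/jyotish/yogas/combination_yogas.py | detect_chatusagara_yoga
-- ===== SOURCE A (Python) =====
-- from typing import Dict, List
--
-- BENEFICS = ["Venus", "Jupiter", "Mercury", "Moon"]
--
-- def detect_chatusagara_yoga(planets: Dict, houses: List[Dict]) -> bool:
--     """
--     Phase 6: Chatusagara Yoga detection.
--
--     Condition: All four benefics (Venus, Jupiter, Mercury, Moon) in Kendra (1, 4, 7, 10).
--
--     Args:
--         planets: Dictionary of planet positions
--         houses: List of house data
--
--     Returns: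
--         True if Chatusagara Yoga is present
--     """
--     kendra_planets = []
--
--     for planet_name, planet_data in planets.items():
--         if planet_name in BENEFICS:
--             planet_house = planet_data.get("house", 0)
--             if planet_house in [1, 4, 7, 10]:
--                 kendra_planets.append(planet_name)
--
--     # Check if all 4 benefics are in Kendra
--     return len(kendra_planets) == 4
-- ===== SOURCE B (Python) =====
-- BENEFICS = ["Venus", "Jupiter", "Mercury", "Moon"]
--
-- def detect_chatusagara_yoga(planets, houses):
--     # Iterate the fixed benefic list and look each one up in the dict,
--     # instead of scanning every planet entry and filtering by membership.
--     return all(planets.get(b, {}).get("house", 0) in (1, 4, 7, 10) for b in BENEFICS)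
-- ===== Notes on version B (the rewrite author's own statement) =====
-- stated objective: idiomatic
-- what changed: Instead of scanning every entry of planets and filtering by BENEFICS membership while accumulating a list whose length is compared to 4, B iterates over the fixed 4-element BENEFICS list and looks each name up directly in the planets dict, returning all(...) with no accumulator.
import Mathlib
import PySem

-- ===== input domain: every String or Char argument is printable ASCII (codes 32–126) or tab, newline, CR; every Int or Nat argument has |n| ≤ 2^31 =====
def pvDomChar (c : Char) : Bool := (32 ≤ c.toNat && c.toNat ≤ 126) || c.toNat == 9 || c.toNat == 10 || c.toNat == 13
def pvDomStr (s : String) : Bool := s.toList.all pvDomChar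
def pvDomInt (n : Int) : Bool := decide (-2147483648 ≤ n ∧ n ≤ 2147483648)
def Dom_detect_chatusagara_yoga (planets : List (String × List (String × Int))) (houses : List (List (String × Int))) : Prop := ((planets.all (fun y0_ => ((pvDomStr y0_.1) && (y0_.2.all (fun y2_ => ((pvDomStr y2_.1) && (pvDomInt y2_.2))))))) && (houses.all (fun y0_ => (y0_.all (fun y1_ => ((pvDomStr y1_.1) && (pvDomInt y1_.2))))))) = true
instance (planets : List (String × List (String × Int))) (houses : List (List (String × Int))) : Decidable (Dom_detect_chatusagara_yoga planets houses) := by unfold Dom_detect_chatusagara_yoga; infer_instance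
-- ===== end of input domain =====

-- B iterates over the fixed BENEFICS list and looks each planet up in the dict, instead of
-- scanning all planets, filtering by membership and counting (objective: idiomatic).

-- ===== PORT A =====
def BENEFICS : List String := ["Venus", "Jupiter", "Mercury", "Moon"]

def KENDRAS : List Int := [1, 4, 7, 10]

def detect_chatusagara_yoga (planets : List (String × List (String × Int))) (houses : List (List (String × Int))) : Bool :=
  let kendra_planets : List String :=
    planets.foldl (fun acc p =>
      if BENEFICS.contains p.1 then
        let planet_house : Int := (PySem.Dict.mk p.2).getD "house" 0
        if KENDRAS.contains planet_house then acc ++ [p.1] else acc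
      else acc) []
  kendra_planets.length == 4

-- ===== PORT B =====
def detect_chatusagara_yoga_alt (planets : List (String × List (String × Int))) (houses : List (List (String × Int))) : Bool :=
  BENEFICS.all (fun b =>
    KENDRAS.contains ((PySem.Dict.mk ((PySem.Dict.mk planets).getD b [])).getD "house" 0))

-- ===== PRECONDITION & SPEC =====
-- Pre_ excludes association lists whose planet names repeat: a Python dict cannot hold
-- duplicate keys, so such lists encode no dict input A could ever receive.
def Pre_detect_chatusagara_yoga (planets : List (String × List (String × Int))) (houses : List (List (String × Int))) : Prop :=
  (planets.map Prod.fst).Nodup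
instance (planets : List (String × List (String × Int))) (houses : List (List (String × Int))) : Decidable (Pre_detect_chatusagara_yoga planets houses) := by unfold Pre_detect_chatusagara_yoga; infer_instance

def pvWitness_detect_chatusagara_yoga : (List (String × List (String × Int))) × (List (List (String × Int))) :=
  ([("Venus", [("house", 1)]), ("Jupiter", [("house", 4)]), ("Mercury", [("house", 7)]), ("Moon", [("house", 10)])], [])

def Spec_detect_chatusagara_yoga (planets : List (String × List (String × Int))) (houses : List (List (String × Int))) (out : Bool) : Prop := out = detect_chatusagara_yoga_alt planets houses
instance (planets : List (String × List (String × Int))) (houses : List (List (String × Int))) (out : Bool) : Decidable (Spec_detect_chatusagara_yoga planets houses out) := by unfold Spec_detect_chatusagara_yoga; infer_instance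

-- ===== CLAIM (what is proved, stated in full; the proofs are below) =====
def Claim_equal_detect_chatusagara_yoga : Prop := ∀ (planets : List (String × List (String × Int))) (houses : List (List (String × Int))), Dom_detect_chatusagara_yoga planets houses → Pre_detect_chatusagara_yoga planets houses → Spec_detect_chatusagara_yoga planets houses (detect_chatusagara_yoga planets houses)

-- ===== LEMMAS AND PROOFS =====

-- B's per-planet condition: the first entry for b (or {}) has a kendra house.
def condB (planets : List (String × List (String × Int))) (b : String) : Bool :=
  KENDRAS.contains ((PySem.Dict.mk ((PySem.Dict.mk planets).getD b [])).getD "house" 0)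

-- 0/1 indicator of condB.
def indB (planets : List (String × List (String × Int))) (b : String) : Nat :=
  if condB planets b then 1 else 0

-- A's per-entry predicate.
def predA (p : String × List (String × Int)) : Bool :=
  BENEFICS.contains p.1 && KENDRAS.contains ((PySem.Dict.mk p.2).getD "house" 0)

theorem foldlA_length (l : List (String × List (String × Int))) (acc : List String) :
    (l.foldl (fun acc p =>
      if BENEFICS.contains p.1 then
        if KENDRAS.contains ((PySem.Dict.mk p.2).getD "house" 0) then acc ++ [p.1] else acc
      else acc) acc).length = acc.length + l.countP predA := by
  induction l generalizing acc with
  | nil => simp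
  | cons p rest ih =>
    simp only [List.foldl_cons, List.countP_cons]
    rw [ih]
    by_cases h1 : p.1 ∈ BENEFICS <;>
      by_cases h2 : (PySem.Dict.mk p.2).getD "house" 0 ∈ KENDRAS <;>
        simp [predA, h1, h2] <;> omega

theorem condB_not_mem (planets : List (String × List (String × Int))) (b : String)
    (h : b ∉ planets.map Prod.fst) : condB planets b = false := by
  have hf : planets.find? (fun p => p.1 == b) = none := by
    rw [List.find?_eq_none]
    intro p hp
    simp only [beq_iff_eq]
    intro e
    exact h (e ▸ List.mem_map_of_mem hp)
  simp [condB, PySem.Dict.getD, PySem.Dict.get?, hf, KENDRAS]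

theorem condB_cons (n : String) (d : List (String × Int)) (rest : List (String × List (String × Int))) (b : String) :
    condB ((n, d) :: rest) b
      = if n == b then KENDRAS.contains ((PySem.Dict.mk d).getD "house" 0) else condB rest b := by
  by_cases h : n == b <;>
    simp [condB, PySem.Dict.getD_eq_get?_getD, PySem.Dict.get?_mk_cons, h]

theorem countP_eq_sum_indB (planets : List (String × List (String × Int)))
    (hnd : (planets.map Prod.fst).Nodup) :
    planets.countP predA =
      indB planets "Venus" + indB planets "Jupiter" + indB planets "Mercury" + indB planets "Moon" := by
  induction planets with
  | nil => simp [indB, condB, PySem.Dict.getD, PySem.Dict.get?, KENDRAS]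
  | cons p rest ih =>
    obtain ⟨n, d⟩ := p
    simp only [List.map_cons, List.nodup_cons] at hnd
    obtain ⟨hnotin, hndr⟩ := hnd
    have ihr := ih hndr
    rw [List.countP_cons, ihr]
    by_cases hV : n = "Venus"
    · have h0 : condB rest "Venus" = false := condB_not_mem rest _ (hV ▸ hnotin)
      subst hV
      by_cases h2 : (PySem.Dict.mk d).getD "house" 0 ∈ KENDRAS <;>
        simp [indB, condB_cons, predA, BENEFICS, h2, h0] <;> omega
    by_cases hJ : n = "Jupiter"
    · have h0 : condB rest "Jupiter" = false := condB_not_mem rest _ (hJ ▸ hnotin)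
      subst hJ
      by_cases h2 : (PySem.Dict.mk d).getD "house" 0 ∈ KENDRAS <;>
        simp [indB, condB_cons, predA, BENEFICS, h2, h0] <;> omega
    by_cases hM : n = "Mercury"
    · have h0 : condB rest "Mercury" = false := condB_not_mem rest _ (hM ▸ hnotin)
      subst hM
      by_cases h2 : (PySem.Dict.mk d).getD "house" 0 ∈ KENDRAS <;>
        simp [indB, condB_cons, predA, BENEFICS, h2, h0] <;> omega
    by_cases hMo : n = "Moon"
    · have h0 : condB rest "Moon" = false := condB_not_mem rest _ (hMo ▸ hnotin)
      subst hMo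
      by_cases h2 : (PySem.Dict.mk d).getD "house" 0 ∈ KENDRAS <;>
        simp [indB, condB_cons, predA, BENEFICS, h2, h0] <;> omega
    · simp [indB, condB_cons, predA, BENEFICS,
        beq_eq_false_iff_ne.mpr hV, beq_eq_false_iff_ne.mpr hJ,
        beq_eq_false_iff_ne.mpr hM, beq_eq_false_iff_ne.mpr hMo, hV, hJ, hM, hMo]

theorem alt_eq_all (planets : List (String × List (String × Int))) (houses : List (List (String × Int))) :
    detect_chatusagara_yoga_alt planets houses =
      (condB planets "Venus" && condB planets "Jupiter" && condB planets "Mercury" && condB planets "Moon") := by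
  simp [detect_chatusagara_yoga_alt, BENEFICS, condB, Bool.and_assoc]

-- ===== VERDICT (by name: the statement is the Claim_ definition above) =====
theorem detect_chatusagara_yoga_spec : Claim_equal_detect_chatusagara_yoga := by
  intro planets houses _hdom hpre
  unfold Spec_detect_chatusagara_yoga
  rw [show detect_chatusagara_yoga planets houses =
      ((planets.foldl (fun acc p =>
        if BENEFICS.contains p.1 then
          if KENDRAS.contains ((PySem.Dict.mk p.2).getD "house" 0) then acc ++ [p.1] else acc
        else acc) ([] : List String)).length == 4) from rfl]
  rw [foldlA_length, countP_eq_sum_indB planets hpre, alt_eq_all]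
  simp only [List.length_nil, Nat.zero_add, indB]
  cases hV : condB planets "Venus" <;> cases hJ : condB planets "Jupiter" <;>
    cases hM : condB planets "Mercury" <;> cases hMo : condB planets "Moon" <;> simp
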